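-- pv_equiv track=rewrite | github.com/BcKmini/Python_Algorithm | 백준/Silver/2805. 나무 자르기/나무 자르기.py | tree_cutting
-- ===== SOURCE A (Python) =====
-- def tree_cutting(trees, m):
--     # 이분 탐색의 범위를 설정
--     low, high = 0, max(trees)
--     result = 0
--
--     while low <= high:
--         mid = (low + high) // 2
--         total = sum((tree - mid) for tree in trees if tree > mid)
--
--         if total >= m:
--             result = mid  # M 이상이면 더 높게 절단할 수 있는지 탐색
--             low = mid + 1
--         else:
--             high = mid - 1
--
--     return result
-- ===== SOURCE B (Python) =====
-- def tree_cutting(trees, m):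
--     # Sort once and precompute suffix sums, so each probed height is answered
--     # by a bisection into the sorted list instead of a scan over all trees.
--     ts = sorted(trees)
--     n = len(ts)
--     suf = [0] * (n + 1)          # suf[i] = sum(ts[i:])
--     for i in range(n - 1, -1, -1):
--         suf[i] = suf[i + 1] + ts[i]
--
--     def harvest(mid):
--         # first index whose tree is strictly taller than mid (bisect_right)
--         lo, hi = 0, n
--         while lo < hi:
--             md = (lo + hi) // 2
--             if ts[md] <= mid:
--                 lo = md + 1
--             else:
--                 hi = md
--         return suf[lo] - (n - lo) * mid
--
--     low, high = 0, max(trees)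
--     result = 0
--     while low <= high:
--         mid = (low + high) // 2
--         if harvest(mid) >= m:
--             result = mid
--             low = mid + 1
--         else:
--             high = mid - 1
--     return result
-- ===== Notes on version B (the rewrite author's own statement) =====
-- stated objective: alternative
-- what changed: B sorts the trees once and precomputes suffix sums, answering each probed height by a bisection into the sorted list instead of rescanning all trees.
import Mathlib
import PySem

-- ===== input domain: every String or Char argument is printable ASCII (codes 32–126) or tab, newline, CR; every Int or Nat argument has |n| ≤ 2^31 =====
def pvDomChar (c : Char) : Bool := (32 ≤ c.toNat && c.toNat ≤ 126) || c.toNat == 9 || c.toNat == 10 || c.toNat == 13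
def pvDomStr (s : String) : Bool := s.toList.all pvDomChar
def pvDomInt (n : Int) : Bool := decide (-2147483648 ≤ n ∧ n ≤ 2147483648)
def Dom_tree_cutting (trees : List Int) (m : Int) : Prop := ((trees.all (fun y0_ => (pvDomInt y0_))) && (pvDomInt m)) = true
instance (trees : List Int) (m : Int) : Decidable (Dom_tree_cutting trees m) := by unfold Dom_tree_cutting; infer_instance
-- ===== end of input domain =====

-- B (alternative): sorts once and answers each probed height via suffix sums + bisection instead of rescanning all trees.

-- ===== PORT A =====
-- A's while-loop on state (low, high, result); the fuel (high - low + 1).toNat is an upper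
-- bound on the number of iterations (the interval shrinks each round), so the fuel-0 case
-- is reached only with low > high, exactly the Python loop's exit.
def tcLoopA (trees : List Int) (m : Int) : Nat → Int → Int → Int → Int
  | 0, _, _, result => result
  | fuel + 1, low, high, result =>
    if low ≤ high then
      let mid := PySem.Int.floordiv (low + high) 2
      let total := ((trees.filter (fun t => decide (mid < t))).map (fun t => t - mid)).sum
      if m ≤ total then tcLoopA trees m fuel (mid + 1) high mid
      else tcLoopA trees m fuel low (mid - 1) result
    else result

def tree_cutting (trees : List Int) (m : Int) : Int :=
  -- max(trees) raises on []; Pre_ excludes that input, the port defaults to 0 there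
  let high := (PySem.List.max? trees (fun x => x)).getD 0
  tcLoopA trees m (high + 1).toNat 0 high 0

-- ===== PORT B =====
-- suffix sums: tcSuf ts = the Python array suf with suf[i] = sum(ts[i:])
def tcSuf : List Int → List Int
  | [] => [0]
  | t :: rest =>
    let s := tcSuf rest
    (t + s.headD 0) :: s

-- the hand-written bisect_right loop of Source B; fuel (hi - lo) bounds the iterations
-- (the half-interval shrinks strictly), so fuel 0 is reached only with hi ≤ lo = loop exit
def tcBis (ts : List Int) (x : Int) : Nat → Nat → Nat → Nat
  | 0, lo, _ => lo
  | fuel + 1, lo, hi =>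
    if lo < hi then
      let md := (lo + hi) / 2
      if ts.getD md 0 ≤ x then tcBis ts x fuel (md + 1) hi else tcBis ts x fuel lo md
    else lo

def tcHarvestB (ts suf : List Int) (mid : Int) : Int :=
  let i := tcBis ts mid ts.length 0 ts.length
  suf.getD i 0 - ((ts.length : Int) - (i : Int)) * mid

def tcLoopB (ts suf : List Int) (m : Int) : Nat → Int → Int → Int → Int
  | 0, _, _, result => result
  | fuel + 1, low, high, result =>
    if low ≤ high then
      let mid := PySem.Int.floordiv (low + high) 2
      if m ≤ tcHarvestB ts suf mid then tcLoopB ts suf m fuel (mid + 1) high mid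
      else tcLoopB ts suf m fuel low (mid - 1) result
    else result

def tree_cutting_alt (trees : List Int) (m : Int) : Int :=
  let ts := PySem.List.sorted trees (fun x => x)
  let suf := tcSuf ts
  let high := (PySem.List.max? trees (fun x => x)).getD 0
  tcLoopB ts suf m (high + 1).toNat 0 high 0

-- ===== PRECONDITION & SPEC =====
-- Pre_ excludes only the empty list, on which Python A raises ValueError (max() of empty sequence); B raises there too.
def Pre_tree_cutting (trees : List Int) (m : Int) : Prop := trees ≠ []
instance (trees : List Int) (m : Int) : Decidable (Pre_tree_cutting trees m) := by
  unfold Pre_tree_cutting; infer_instance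

def pvWitness_tree_cutting : List Int × Int := ([2, 4, 6], 5)

def Spec_tree_cutting (trees : List Int) (m : Int) (out : Int) : Prop := out = tree_cutting_alt trees m
instance (trees : List Int) (m : Int) (out : Int) : Decidable (Spec_tree_cutting trees m out) := by unfold Spec_tree_cutting; infer_instance

-- ===== CLAIM (what is proved, stated in full; the proofs are below) =====
def Claim_equal_tree_cutting : Prop := ∀ (trees : List Int) (m : Int), Dom_tree_cutting trees m → Pre_tree_cutting trees m → Spec_tree_cutting trees m (tree_cutting trees m)

-- ===== LEMMAS AND PROOFS =====

theorem tcSuf_getD (ts : List Int) (i : Nat) (hi : i ≤ ts.length) :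
    (tcSuf ts).getD i 0 = (ts.drop i).sum := by
  induction ts generalizing i with
  | nil =>
    have h0 : i = 0 := by simpa using hi
    subst h0; simp [tcSuf]
  | cons t rest ih =>
    cases i with
    | zero =>
      have h0 := ih 0 (Nat.zero_le _)
      simp only [List.drop_zero] at h0 ⊢
      cases hs : tcSuf rest with
      | nil => rw [hs] at h0; simp at h0; simp [tcSuf, hs, ← h0]
      | cons a s' =>
        rw [hs] at h0
        simp only [List.getD, List.getElem?_cons_zero, Option.getD_some] at h0
        simp [tcSuf, hs, h0, List.sum_cons]
    | succ j =>
      have := ih j (by simpa using hi)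
      simpa [tcSuf] using this

-- the bisect loop: invariant "everything below lo is ≤ x, everything from hi on is > x"
theorem tcBis_spec (ts : List Int) (x : Int)
    (hmono : ∀ p q : Nat, p ≤ q → q < ts.length → ts.getD p 0 ≤ ts.getD q 0) :
    ∀ (fuel lo hi : Nat), hi - lo ≤ fuel → lo ≤ hi → hi ≤ ts.length →
    (∀ j : Nat, j < lo → ts.getD j 0 ≤ x) →
    (∀ j : Nat, hi ≤ j → j < ts.length → x < ts.getD j 0) →
    lo ≤ tcBis ts x fuel lo hi ∧ tcBis ts x fuel lo hi ≤ hi ∧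
      (∀ j : Nat, j < tcBis ts x fuel lo hi → ts.getD j 0 ≤ x) ∧
      (∀ j : Nat, tcBis ts x fuel lo hi ≤ j → j < ts.length → x < ts.getD j 0) := by
  intro fuel
  induction fuel with
  | zero =>
    intro lo hi hf hlh hhl hbelow habove
    have heq : lo = hi := by omega
    subst heq
    simp only [tcBis]
    exact ⟨le_refl _, le_refl _, hbelow, habove⟩
  | succ fuel ih =>
    intro lo hi hf hlh hhl hbelow habove
    rw [tcBis]
    by_cases h : lo < hi
    · rw [if_pos h]
      by_cases hc : ts.getD ((lo + hi) / 2) 0 ≤ x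
      · rw [if_pos hc]
        have hmd1 : lo ≤ (lo + hi) / 2 := by omega
        have hmd2 : (lo + hi) / 2 < hi := by omega
        have hrec := ih ((lo + hi) / 2 + 1) hi (by omega) (by omega) hhl
          (fun j hj => by
            rcases Nat.lt_or_ge j ((lo + hi) / 2) with hj' | hj'
            · exact le_trans (hmono j ((lo + hi) / 2) (by omega) (by omega)) hc
            · have hje : j = (lo + hi) / 2 := by omega
              rw [hje]; exact hc)
          habove
        exact ⟨by omega, hrec.2.1, hrec.2.2.1, hrec.2.2.2⟩
      · rw [if_neg hc]
        replace hc := lt_of_not_ge hc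
        have hmd1 : lo ≤ (lo + hi) / 2 := by omega
        have hmd2 : (lo + hi) / 2 < hi := by omega
        have hrec := ih lo ((lo + hi) / 2) (by omega) (by omega) (by omega) hbelow
          (fun j hj1 hj2 => lt_of_lt_of_le hc (hmono ((lo + hi) / 2) j hj1 hj2))
        exact ⟨hrec.1, by omega, hrec.2.2.1, hrec.2.2.2⟩
    · rw [if_neg h]
      have heq : lo = hi := by omega
      subst heq
      exact ⟨le_refl _, le_refl _, hbelow, habove⟩

theorem map_sub_sum (l : List Int) (x : Int) :
    (l.map (fun t => t - x)).sum = l.sum - (l.length : Int) * x := by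
  induction l with
  | nil => simp
  | cons a l ih => simp [ih]; ring

theorem harvest_eq (trees : List Int) (mid : Int) :
    tcHarvestB (PySem.List.sorted trees (fun x => x)) (tcSuf (PySem.List.sorted trees (fun x => x))) mid
      = ((trees.filter (fun t => decide (mid < t))).map (fun t => t - mid)).sum := by
  set ts := PySem.List.sorted trees (fun x => x) with hts
  have hperm : ts.Perm trees := PySem.List.sorted_perm trees (fun x => x) false
  have hmono : ∀ p q : Nat, p ≤ q → q < ts.length → ts.getD p 0 ≤ ts.getD q 0 := by
    intro p q hpq hq
    rw [List.getD_eq_getElem ts 0 (by omega), List.getD_eq_getElem ts 0 hq]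
    exact PySem.List.sorted_id_getElem_mono trees hpq hq
  obtain ⟨h1, h2, h3, h4⟩ := tcBis_spec ts mid hmono ts.length 0 ts.length (by omega)
    (Nat.zero_le _) le_rfl (by omega) (by omega)
  set i := tcBis ts mid ts.length 0 ts.length with hib
  have hfilter : ts.filter (fun t => decide (mid < t)) = ts.drop i := by
    conv_lhs => rw [← List.take_append_drop i ts]
    rw [List.filter_append]
    have htake : (ts.take i).filter (fun t => decide (mid < t)) = [] := by
      rw [List.filter_eq_nil_iff]
      intro t ht
      obtain ⟨j, hj, hjt⟩ := List.mem_iff_getElem.mp ht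
      have hjlen : j < ts.length := by
        have := List.length_take_le i ts; omega
      have := h3 j (by rw [List.length_take] at hj; omega)
      rw [List.getD_eq_getElem ts 0 hjlen] at this
      rw [List.getElem_take] at hjt
      simp [← hjt]
      omega
    have hdrop : (ts.drop i).filter (fun t => decide (mid < t)) = ts.drop i := by
      rw [List.filter_eq_self]
      intro t ht
      obtain ⟨j, hj, hjt⟩ := List.mem_iff_getElem.mp ht
      rw [List.getElem_drop] at hjt
      have hjl : i + j < ts.length := by
        have hlen := hj; rw [List.length_drop] at hlen; omega
      have := h4 (i + j) (by omega) hjl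
      rw [List.getD_eq_getElem ts 0 hjl] at this
      simp [← hjt]
      omega
    rw [htake, hdrop, List.nil_append]
  have hsum : ((trees.filter (fun t => decide (mid < t))).map (fun t => t - mid)).sum
      = ((ts.drop i).map (fun t => t - mid)).sum := by
    rw [← hfilter]
    exact (((hperm.filter _).map _).sum_eq).symm
  rw [hsum, map_sub_sum]
  show (tcSuf ts).getD i 0 - ((ts.length : Int) - (i : Int)) * mid = _
  rw [tcSuf_getD ts i h2, List.length_drop]
  have : ((ts.length - i : Nat) : Int) = (ts.length : Int) - (i : Int) := by omega
  rw [this]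

theorem loop_eq (trees : List Int) (m : Int) :
    ∀ (fuel : Nat) (low high result : Int),
      tcLoopA trees m fuel low high result
        = tcLoopB (PySem.List.sorted trees (fun x => x)) (tcSuf (PySem.List.sorted trees (fun x => x))) m fuel low high result := by
  intro fuel
  induction fuel with
  | zero => intro low high result; rfl
  | succ fuel ih =>
    intro low high result
    rw [tcLoopA, tcLoopB]
    by_cases h : low ≤ high
    · rw [if_pos h, if_pos h]
      simp only [harvest_eq]
      by_cases hc : m ≤ ((trees.filter (fun t => decide ((PySem.Int.floordiv (low + high) 2) < t))).map (fun t => t - (PySem.Int.floordiv (low + high) 2))).sum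
      · rw [if_pos hc, if_pos hc]
        exact ih _ _ _
      · rw [if_neg hc, if_neg hc]
        exact ih _ _ _
    · rw [if_neg h, if_neg h]

-- ===== VERDICT (by name: the statement is the Claim_ definition above) =====
theorem tree_cutting_spec : Claim_equal_tree_cutting := by
  intro trees m _ _
  show tree_cutting trees m = tree_cutting_alt trees m
  unfold tree_cutting tree_cutting_alt
  exact loop_eq trees m _ 0 _ 0
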